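-- pv_equiv track=rewrite | github.com/cafaray/atco.de-fights | crossingSum.py | crossingSum
-- ===== SOURCE A (Python) =====
-- def crossingSum(matrix, a, b):
--     res=0
--     max=0
--     for i in range(len(matrix)):
--         res+=matrix[i][b]
--         i+=1
--     for j in range(len(matrix[0])):
--         if j==b:
--             continue
--         res += matrix[a][j]
--         j+=1
--     return res
-- ===== SOURCE B (Python) =====
-- def crossingSum(matrix, a, b):
--     ai = range(len(matrix))[a]
--     bj = range(len(matrix[0]))[b]
--     return sum(x
--                for i, row in enumerate(matrix)
--                for j, x in enumerate(row)
--                if i == ai or j == bj)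
-- ===== Notes on version B (the rewrite author's own statement) =====
-- stated objective: alternative
-- what changed: Instead of two targeted index loops (column b, then row a with a skip-b branch), B normalizes both indices via range(...)[i] and scans every cell of the matrix once, summing the cells whose row index equals a or column index equals b.
-- intended difference: For a negative in-range column index b, A's skip test j==b never matches the nonnegative loop counter so A counts the crossing cell matrix[a][b] twice, while B counts it once, which is the intended crossing sum; they coincide exactly when that cell is 0. — e.g. on crossingSum([[1, 2], [3, 4]], 0, -1): A returns 9, B returns 7
-- outside the precondition, e.g. on crossingSum([[1, 2], [3, 4, 5]], 1, 0): A returns 8, B returns 13; on crossingSum([[0]], 3, 0): A returns 0, B raises IndexError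
import Mathlib
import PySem

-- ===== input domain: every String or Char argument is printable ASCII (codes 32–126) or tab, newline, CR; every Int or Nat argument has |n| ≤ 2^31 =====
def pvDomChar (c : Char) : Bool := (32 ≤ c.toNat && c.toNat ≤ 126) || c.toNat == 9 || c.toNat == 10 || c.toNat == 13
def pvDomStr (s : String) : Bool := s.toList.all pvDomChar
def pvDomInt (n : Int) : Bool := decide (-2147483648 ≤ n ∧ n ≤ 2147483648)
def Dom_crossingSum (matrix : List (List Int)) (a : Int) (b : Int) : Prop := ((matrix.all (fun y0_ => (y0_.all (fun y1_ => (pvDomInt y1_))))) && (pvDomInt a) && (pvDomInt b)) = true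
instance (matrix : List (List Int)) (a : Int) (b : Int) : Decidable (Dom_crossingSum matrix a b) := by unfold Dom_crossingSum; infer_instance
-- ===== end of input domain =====

-- B normalizes the two indices and scans every cell once, keeping those in row a or column b
-- (objective: alternative — a predicate scan instead of two targeted index loops).

-- ===== PORT A =====
def crossingSum (matrix : List (List Int)) (a : Int) (b : Int) : Int :=
  let res : Int := (PySem.List.pyRange 0 (matrix.length : Int) 1).foldl
    (fun res i => res + PySem.List.pyGetD (PySem.List.pyGetD matrix i []) b 0) 0
  (PySem.List.pyRange 0 ((PySem.List.pyGetD matrix 0 []).length : Int) 1).foldl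
    (fun res j => if j == b then res else res + PySem.List.pyGetD (PySem.List.pyGetD matrix a []) j 0) res

-- ===== PORT B =====
def crossingSum_alt (matrix : List (List Int)) (a : Int) (b : Int) : Int :=
  match PySem.List.pyGet? (PySem.List.pyRange 0 (matrix.length : Int) 1) a,
        PySem.List.pyGet? (PySem.List.pyRange 0 ((PySem.List.pyGetD matrix 0 []).length : Int) 1) b with
  | some ai, some bj =>
      ((PySem.List.enumerate matrix).flatMap (fun p =>
        ((PySem.List.enumerate p.2).filter (fun q => p.1 == ai || q.1 == bj)).map (fun q => q.2))).sum
  | _, _ => 0  -- range(...)[i] raised IndexError in Python; these inputs are outside Pre_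

-- ===== PRECONDITION & SPEC =====
-- Pre_ excludes inputs where A raises (empty matrix, index a or b out of range of the rows they
-- touch) and the ragged shapes on which A's second loop is accidentally truncated to len(matrix[0]):
-- row a must have width len(matrix[0]), and for negative b all rows must share that width.
def Pre_crossingSum (matrix : List (List Int)) (a : Int) (b : Int) : Prop :=
  matrix ≠ [] ∧ PySem.Raise.InRange matrix.length a ∧
  (∀ row ∈ matrix, PySem.Raise.InRange row.length b) ∧
  (matrix.getD (a % (matrix.length : Int)).toNat []).length = (matrix.headD []).length ∧
  (b < 0 → ∀ row ∈ matrix, row.length = (matrix.headD []).length)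
instance (matrix : List (List Int)) (a : Int) (b : Int) : Decidable (Pre_crossingSum matrix a b) := by
  unfold Pre_crossingSum; infer_instance
def pvWitness_crossingSum : List (List Int) × Int × Int := ([[1, 2], [3, 4]], 0, 1)

-- For a negative in-range column index b, A's skip test j==b never matches the nonnegative loop
-- counter so A counts the crossing cell matrix[a][b] twice, while B counts it once, the intended
-- crossing sum; they coincide exactly when that cell is 0.
def D_crossingSum (matrix : List (List Int)) (a : Int) (b : Int) : Prop :=
  b < 0 ∧
  (matrix.getD (a % (matrix.length : Int)).toNat []).getD
    (b % ((matrix.headD []).length : Int)).toNat 0 ≠ 0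
instance (matrix : List (List Int)) (a : Int) (b : Int) : Decidable (D_crossingSum matrix a b) := by
  unfold D_crossingSum; infer_instance

def Spec_crossingSum (matrix : List (List Int)) (a : Int) (b : Int) (out : Int) : Prop :=
  ¬ D_crossingSum matrix a b → out = crossingSum_alt matrix a b
instance (matrix : List (List Int)) (a : Int) (b : Int) (out : Int) : Decidable (Spec_crossingSum matrix a b out) := by
  unfold Spec_crossingSum; infer_instance

def pvDiffWitness_crossingSum : List (List Int) × Int × Int := ([[1, 2], [3, 4]], 0, -1)
def pvDiffWitnessOut_crossingSum : Int × Int := (9, 7)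

-- ===== CLAIM (what is proved, stated in full; the proofs are below) =====
def Claim_unchanged_crossingSum : Prop := ∀ (matrix : List (List Int)) (a : Int) (b : Int), Dom_crossingSum matrix a b → Pre_crossingSum matrix a b → Spec_crossingSum matrix a b (crossingSum matrix a b)
def Claim_changed_crossingSum : Prop := Dom_crossingSum (pvDiffWitness_crossingSum.1) (pvDiffWitness_crossingSum.2.1) (pvDiffWitness_crossingSum.2.2) ∧ Pre_crossingSum (pvDiffWitness_crossingSum.1) (pvDiffWitness_crossingSum.2.1) (pvDiffWitness_crossingSum.2.2) ∧ D_crossingSum (pvDiffWitness_crossingSum.1) (pvDiffWitness_crossingSum.2.1) (pvDiffWitness_crossingSum.2.2) ∧ crossingSum (pvDiffWitness_crossingSum.1) (pvDiffWitness_crossingSum.2.1) (pvDiffWitness_crossingSum.2.2) = pvDiffWitnessOut_crossingSum.1 ∧ crossingSum_alt (pvDiffWitness_crossingSum.1) (pvDiffWitness_crossingSum.2.1) (pvDiffWitness_crossingSum.2.2) = pvDiffWitnessOut_crossingSum.2 ∧ pvDiffWitnessOut_crossingSum.1 ≠ pvDiffWitnessOut_crossingSum.2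
def Claim_exact_crossingSum : Prop := ∀ (matrix : List (List Int)) (a : Int) (b : Int), Dom_crossingSum matrix a b → Pre_crossingSum matrix a b → D_crossingSum matrix a b → crossingSum matrix a b ≠ crossingSum_alt matrix a b

-- ===== LEMMAS AND PROOFS =====

-- Python-style indexing agrees with the plain getD form used by D_crossingSum.
theorem pyGetD_eq_getD_shift {α : Type} (xs : List α) (i : Int) (d : α)
    (h : PySem.Raise.InRange xs.length i) :
    PySem.List.pyGetD xs i d
      = xs.getD (if i < 0 then ((xs.length : Int) + i).toNat else i.toNat) d := by
  have hr : -(xs.length : Int) ≤ i ∧ i < (xs.length : Int) := by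
    simpa [PySem.Raise.InRange] using h
  by_cases hi : i < 0
  · have hk1 : 0 < (-i).toNat := by omega
    have hk2 : (-i).toNat ≤ xs.length := by omega
    have hi' : i = -(((-i).toNat : Nat) : Int) := by omega
    have hrw := PySem.List.pyGetD_neg_natCast xs (-i).toNat d hk1 hk2
    rw [← hi'] at hrw
    have hlt : xs.length - (-i).toNat < xs.length := by omega
    have h2 : ((xs.length : Int) + i).toNat = xs.length - (-i).toNat := by omega
    rw [hrw, if_pos hi, h2, List.getD_eq_getElem?_getD, List.getElem?_eq_getElem hlt]
    rfl
  · have h0 : 0 ≤ i := by omega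
    rw [PySem.List.pyGetD_eq_getElem xs d h0 hr.2]
    have hlt : i.toNat < xs.length := by omega
    rw [if_neg hi, List.getD_eq_getElem?_getD, List.getElem?_eq_getElem hlt]
    rfl

-- modular normalization of an in-range Python index
theorem emod_norm (x L : Int) (h1 : -L ≤ x) (h2 : x < L) :
    (x % L).toNat = if x < 0 then (L + x).toNat else x.toNat := by
  by_cases hx : x < 0
  · have hmod : x % L = x + L := by
      rw [← Int.add_emod_right, Int.emod_eq_of_lt (by omega) (by omega)]
    rw [hmod, if_pos hx]
    omega
  · have hmod : x % L = x := Int.emod_eq_of_lt (by omega) h2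
    rw [hmod, if_neg hx]

-- Python-style row access equals getD at the modular-normalized index.
theorem rowA_emod (matrix : List (List Int)) (a : Int)
    (ha : PySem.Raise.InRange matrix.length a) :
    PySem.List.pyGetD matrix a [] = matrix.getD (a % (matrix.length : Int)).toNat [] := by
  have har : -(matrix.length : Int) ≤ a ∧ a < (matrix.length : Int) := by
    simpa [PySem.Raise.InRange] using ha
  rw [pyGetD_eq_getD_shift matrix a [] ha, emod_norm a _ har.1 har.2]

-- Under Pre_, the cell D_ inspects (via Python-style modular index normalization) is matrix[a][b].
theorem cell_eq (matrix : List (List Int)) (a b : Int) (h : Pre_crossingSum matrix a b) :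
    (matrix.getD (a % (matrix.length : Int)).toNat []).getD
        (b % ((matrix.headD []).length : Int)).toNat 0
      = PySem.List.pyGetD (PySem.List.pyGetD matrix a []) b 0 := by
  obtain ⟨hne, ha, hbin, hwa, hrectb⟩ := h
  have hrowA : PySem.List.pyGetD matrix a []
      = matrix.getD (a % (matrix.length : Int)).toNat [] := rowA_emod matrix a ha
  have hrmem : matrix.getD (a % (matrix.length : Int)).toNat [] ∈ matrix := by
    rw [← hrowA]; exact PySem.List.pyGetD_mem matrix [] ha
  have hbA : PySem.Raise.InRange (PySem.List.pyGetD matrix a []).length b := by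
    rw [hrowA]; exact hbin _ hrmem
  have hbr : -((matrix.headD []).length : Int) ≤ b ∧ b < ((matrix.headD []).length : Int) := by
    have := hbin _ hrmem
    rw [hwa] at this
    simpa [PySem.Raise.InRange] using this
  rw [pyGetD_eq_getD_shift (PySem.List.pyGetD matrix a []) b 0 hbA, hrowA, hwa]
  have hB : (b % ((matrix.headD []).length : Int)).toNat
      = if b < 0 then (((matrix.headD []).length : Int) + b).toNat else b.toNat :=
    emod_norm b _ hbr.1 hbr.2
  rw [hB]

-- Loop 1 of A is the column-b sum over all rows.
theorem loop1_eq (matrix : List (List Int)) (b : Int) :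
    (PySem.List.pyRange 0 (matrix.length : Int) 1).foldl
      (fun res i => res + PySem.List.pyGetD (PySem.List.pyGetD matrix i []) b 0) 0
    = (matrix.map (fun row => PySem.List.pyGetD row b 0)).sum := by
  rw [PySem.List.foldl_pyRange_zero_pyGetD' matrix []
        (fun res row => res + PySem.List.pyGetD row b 0) 0,
      PySem.List.foldl_add]
  simp

-- Loop 2 of A, negative b: the skip never fires, the whole row is added.
theorem loop2_neg (l : List Int) (b init : Int) (hb : b < 0) :
    (PySem.List.pyRange 0 (l.length : Int) 1).foldl
      (fun res j => if j == b then res else res + PySem.List.pyGetD l j 0) init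
    = init + l.sum := by
  rw [PySem.List.foldl_congr_mem _ _ (fun res j => res + PySem.List.pyGetD l j 0) init
      (by
        intro acc x hx
        have hx0 : 0 ≤ x := (PySem.List.mem_pyRange_one.mp hx).1
        have : (x == b) = false := by simp; omega
        simp [this]),
      PySem.List.foldl_pyRange_zero_pyGetD' l 0 (fun acc v => acc + v) init,
      PySem.List.foldl_add]
  simp

-- Loop 2 of A, 0 ≤ b < length: the whole row except cell b is added.
theorem loop2_nonneg (l : List Int) (b init : Int) (hb0 : 0 ≤ b) (hbl : b < (l.length : Int)) :
    (PySem.List.pyRange 0 (l.length : Int) 1).foldl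
      (fun res j => if j == b then res else res + PySem.List.pyGetD l j 0) init
    = init + l.sum - PySem.List.pyGetD l b 0 := by
  have hsplit : PySem.List.pyRange 0 (l.length : Int) 1
      = PySem.List.pyRange 0 b 1 ++ (b :: PySem.List.pyRange (b + 1) (l.length : Int) 1) := by
    rw [PySem.List.pyRange_one_append 0 b (l.length : Int) hb0 (le_of_lt hbl),
        PySem.List.pyRange_one_cons hbl]
  set g : Int → Int := fun j => PySem.List.pyGetD l j 0 with hg
  have hdrop1 : (PySem.List.pyRange (b + 1) (l.length : Int) 1).map g = l.drop (b + 1).toNat := by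
    exact PySem.List.map_pyGetD_pyRange' l 0 (show (0:Int) ≤ b + 1 by omega)
  have hdrop : (PySem.List.pyRange b (l.length : Int) 1).map g = l.drop b.toNat :=
    PySem.List.map_pyGetD_pyRange' l 0 hb0
  have htake : (PySem.List.pyRange 0 b 1).map g = l.take b.toNat := by
    have hfull : (PySem.List.pyRange 0 (l.length : Int) 1).map g = l :=
      PySem.List.map_pyGetD_pyRange_zero' l 0
    have hsplit2 : PySem.List.pyRange 0 (l.length : Int) 1
        = PySem.List.pyRange 0 b 1 ++ PySem.List.pyRange b (l.length : Int) 1 :=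
      PySem.List.pyRange_one_append 0 b ((l.length : Int)) hb0 (le_of_lt hbl)
    have h1 : (PySem.List.pyRange 0 b 1).map g ++ l.drop b.toNat = l := by
      rw [← hdrop, ← List.map_append, ← hsplit2, hfull]
    have h2 : l.take b.toNat ++ l.drop b.toNat = l := List.take_append_drop _ l
    exact List.append_cancel_right (h1.trans h2.symm)
  have hnb : b.toNat < l.length := by omega
  have hget : g b = l[b.toNat] := PySem.List.pyGetD_eq_getElem l 0 hb0 hbl
  have hcons : l[b.toNat] :: l.drop (b.toNat + 1) = l.drop b.toNat := List.getElem_cons_drop hnb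
  have hsum : l.sum = (l.take b.toNat).sum + (l[b.toNat] + (l.drop (b.toNat + 1)).sum) := by
    have hs1 : (List.drop b.toNat l).sum = l[b.toNat] + (List.drop (b.toNat + 1) l).sum := by
      rw [← hcons, List.sum_cons]
    conv_lhs => rw [← List.take_append_drop b.toNat l]
    rw [List.sum_append, hs1]
  rw [hsplit, List.foldl_append, List.foldl_cons]
  rw [PySem.List.foldl_congr_mem _ _ (fun res j => res + g j) init
      (by
        intro acc x hx
        have hx' := (PySem.List.mem_pyRange_one.mp hx).2
        have : (x == b) = false := by simp; omega
        simp [this, hg])]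
  rw [PySem.List.foldl_add]
  simp only [beq_self_eq_true, if_true]
  rw [PySem.List.foldl_congr_mem _ _
      (fun res j => res + g j) (init + (List.map g (PySem.List.pyRange 0 b)).sum)
      (by
        intro acc x hx
        have hx' := (PySem.List.mem_pyRange_one.mp hx).1
        have : (x == b) = false := by simp; omega
        simp [this, hg])]
  rw [PySem.List.foldl_add, htake, hdrop1]
  have : (b + 1).toNat = b.toNat + 1 := by omega
  rw [this]
  have hget' : PySem.List.pyGetD l b 0 = l[b.toNat] := hget
  rw [hget']
  omega

-- Common unfolding of port A under Pre_.
theorem ports_eval (matrix : List (List Int)) (a b : Int) (h : Pre_crossingSum matrix a b) :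
    crossingSum matrix a b
      = (PySem.List.pyRange 0 ((PySem.List.pyGetD matrix a []).length : Int) 1).foldl
          (fun res j => if j == b then res
            else res + PySem.List.pyGetD (PySem.List.pyGetD matrix a []) j 0)
          ((matrix.map (fun row => PySem.List.pyGetD row b 0)).sum) := by
  obtain ⟨hne, ha, hbin, hwa, hrectb⟩ := h
  have hlen : (PySem.List.pyGetD matrix a []).length = (matrix.headD []).length := by
    rw [rowA_emod matrix a ha]; exact hwa
  have h0 : PySem.List.pyGetD matrix 0 [] = matrix.headD [] := by
    rw [PySem.List.pyGetD_zero]; cases matrix with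
    | nil => simp at hne
    | cons x xs => simp
  show (PySem.List.pyRange 0 ((PySem.List.pyGetD matrix 0 []).length : Int) 1).foldl _ _ = _
  rw [h0, ← hlen, loop1_eq]

-- filter by index on an enumeration: no index matches.
theorem enum_filter_nil {α : Type} (xs : List α) (s c : Int)
    (h : c < s ∨ s + (xs.length : Int) ≤ c) :
    (PySem.List.enumerate xs s).filter (fun q => q.1 == c) = [] := by
  induction xs generalizing s with
  | nil => simp [PySem.List.enumerate_nil]
  | cons x xs ih =>
      rw [PySem.List.enumerate_cons, List.filter_cons]
      have hne : ((s, x).1 == c) = false := by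
        simp only [beq_eq_false_iff_ne, ne_eq]
        simp at h ⊢; omega
      rw [hne]
      exact ih (s + 1) (by simp at h ⊢; omega)

-- filter by index on an enumeration: exactly one index matches.
theorem enum_filter_single {α : Type} (xs : List α) (s c : Int) (d : α)
    (h1 : s ≤ c) (h2 : c < s + (xs.length : Int)) :
    (PySem.List.enumerate xs s).filter (fun q => q.1 == c)
      = [(c, xs.getD (c - s).toNat d)] := by
  induction xs generalizing s with
  | nil => simp at h2; omega
  | cons x xs ih =>
      rw [PySem.List.enumerate_cons, List.filter_cons]
      by_cases hc : s = c
      · subst hc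
        simp only [beq_self_eq_true, if_true]
        rw [enum_filter_nil xs (s + 1) s (by left; omega)]
        simp
      · have hne : ((s, x).1 == c) = false := by
          simp only [beq_eq_false_iff_ne, ne_eq]; exact hc
        rw [hne]
        rw [ih (s + 1) (by omega) (by simp at h2 ⊢; omega)]
        have : (c - s).toNat = (c - (s + 1)).toNat + 1 := by omega
        simp [this]

-- sum of a pointwise if over a list = sum of the else-branch plus corrections on the filtered part.
theorem sum_if_filter {β : Type} (l : List β) (p : β → Bool) (f1 f2 : β → Int) :
    (l.map (fun x => if p x then f1 x else f2 x)).sum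
      = (l.map f2).sum + ((l.filter p).map (fun x => f1 x - f2 x)).sum := by
  induction l with
  | nil => simp
  | cons x xs ih =>
      rw [List.map_cons, List.sum_cons, List.filter_cons, ih]
      by_cases hx : p x = true
      · simp [hx]; ring
      · simp [hx]; ring

-- range(0,n)[x] normalizes an in-range Python index.
theorem pyGet?_pyRange_norm (n x : Int) (h1 : -n ≤ x) (h2 : x < n) :
    PySem.List.pyGet? (PySem.List.pyRange 0 n 1) x = some (if 0 ≤ x then x else x + n) := by
  have hlen : (PySem.List.pyRange 0 n 1).length = n.toNat := by
    rw [PySem.List.length_pyRange_one]; omega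
  by_cases hx : 0 ≤ x
  · have hlt : x.toNat < (PySem.List.pyRange 0 n 1).length := by rw [hlen]; omega
    rw [PySem.List.pyGet?_of_nonneg (h := hx), List.getElem?_eq_getElem hlt,
        PySem.List.getElem_pyRange_one]
    simp [hx]
  · have hk1 : 0 < (-x).toNat := by omega
    have hk2 : (-x).toNat ≤ (PySem.List.pyRange 0 n 1).length := by rw [hlen]; omega
    have hx' : x = -(((-x).toNat : Nat) : Int) := by omega
    rw [hx', PySem.List.pyGet?_neg_natCast _ _ hk1 hk2]  -- xs[-k] from the end
    have hlt : (PySem.List.pyRange 0 n 1).length - (-x).toNat < (PySem.List.pyRange 0 n 1).length := by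
      rw [hlen]; omega
    rw [List.getElem?_eq_getElem hlt, PySem.List.getElem_pyRange_one]
    have hxneg : ¬ 0 ≤ -(((-x).toNat : Nat) : Int) := by omega
    rw [if_neg hxneg]
    simp [hlen]
    omega

-- Port B evaluated under Pre_: column sum + row sum − crossing cell.
theorem alt_eval (matrix : List (List Int)) (a b : Int) (h : Pre_crossingSum matrix a b) :
    crossingSum_alt matrix a b
      = (matrix.map (fun row => PySem.List.pyGetD row b 0)).sum
        + (PySem.List.pyGetD matrix a []).sum
        - PySem.List.pyGetD (PySem.List.pyGetD matrix a []) b 0 := by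
  obtain ⟨hne, ha, hbin, hwa, hrectb⟩ := h
  have har : -(matrix.length : Int) ≤ a ∧ a < (matrix.length : Int) := by
    simpa [PySem.Raise.InRange] using ha
  have hheadmem : matrix.headD [] ∈ matrix := by
    cases matrix with
    | nil => simp at hne
    | cons x xs => simp
  have hbr : -((matrix.headD []).length : Int) ≤ b ∧ b < ((matrix.headD []).length : Int) := by
    simpa [PySem.Raise.InRange] using hbin _ hheadmem
  have h0 : PySem.List.pyGetD matrix 0 [] = matrix.headD [] := by
    rw [PySem.List.pyGetD_zero]; cases matrix with
    | nil => simp at hne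
    | cons x xs => simp
  simp only [crossingSum_alt]
  rw [h0]
  rw [pyGet?_pyRange_norm _ a har.1 har.2, pyGet?_pyRange_norm _ b hbr.1 hbr.2]
  simp only []
  set W : Nat := (matrix.headD []).length with hW
  -- normalized indices
  set ai : Int := if 0 ≤ a then a else a + (matrix.length : Int) with hai
  set bj : Int := if 0 ≤ b then b else b + (W : Int) with hbj
  have hai0 : 0 ≤ ai ∧ ai < (matrix.length : Int) := by
    by_cases h' : 0 ≤ a <;> simp [hai, h'] <;> omega
  have hbj0 : 0 ≤ bj ∧ bj < (W : Int) := by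
    by_cases h' : 0 ≤ b <;> simp [hbj, h'] <;> omega
  -- link pyGetD to getD at the normalized nat indices
  have hrowA : PySem.List.pyGetD matrix a [] = matrix.getD ai.toNat [] := by
    rw [pyGetD_eq_getD_shift matrix a [] ha]
    congr 1
    by_cases h' : 0 ≤ a
    · have : ¬ a < 0 := by omega
      simp [hai, h', this]
    · have : a < 0 := by omega
      simp [hai, h', this]; omega
  have hcellrow : ∀ row ∈ matrix, PySem.List.pyGetD row b 0 = row.getD bj.toNat 0 := by
    intro row hr
    rw [pyGetD_eq_getD_shift row b 0 (hbin row hr)]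
    congr 1
    by_cases h' : 0 ≤ b
    · have : ¬ b < 0 := by omega
      simp [hbj, h', this]
    · have : b < 0 := by omega
      simp [hbj, h', this, hrectb this row hr]; omega
  have hrowmem : matrix.getD ai.toNat [] ∈ matrix := by
    rw [← hrowA]; exact PySem.List.pyGetD_mem matrix [] ha
  -- evaluate the double scan
  rw [List.flatMap_def, List.sum_flatten, List.map_map]
  simp only [Function.comp_def]
  -- inner contribution of each enumerated row
  have hinner : ∀ p ∈ PySem.List.enumerate matrix 0,
      (((PySem.List.enumerate p.2).filter (fun q => p.1 == ai || q.1 == bj)).map (fun q => q.2)).sum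
        = if p.1 == ai then p.2.sum else p.2.getD bj.toNat 0 := by
    intro p hp
    obtain ⟨k, hk, hpk⟩ := (PySem.List.mem_enumerate_iff _ _ _).mp hp
    have hmem2 : p.2 ∈ matrix := by rw [hpk]; exact List.getElem_mem hk
    have hbjlt : bj < (p.2.length : Int) := by
      by_cases h' : 0 ≤ b
      · have := hbin _ hmem2
        simp only [PySem.Raise.InRange] at this
        have hb0 : ¬ b < 0 := by omega
        simp [hbj, h']
        omega
      · have hw : p.2.length = W := hrectb (by omega) _ hmem2
        rw [hw]; exact hbj0.2
    by_cases hpa : p.1 == ai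
    · simp only [hpa, Bool.true_or, List.filter_true]
      rw [PySem.List.map_snd_enumerate]
      simp
    · have hpa' : (p.1 == ai) = false := by simpa using hpa
      simp only [hpa', Bool.false_or]
      rw [enum_filter_single p.2 0 bj 0 hbj0.1 (by omega)]
      simp
  rw [List.map_congr_left hinner]
  rw [sum_if_filter (PySem.List.enumerate matrix 0) (fun p => p.1 == ai)
        (fun p => p.2.sum) (fun p => p.2.getD bj.toNat 0)]
  rw [enum_filter_single matrix 0 ai [] hai0.1 (by omega)]
  have hai' : (ai - 0).toNat = ai.toNat := by omega
  have hsnd : (PySem.List.enumerate matrix 0).map (fun p => p.2.getD bj.toNat 0)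
      = matrix.map (fun row => row.getD bj.toNat 0) := by
    have h := PySem.List.map_snd_enumerate matrix (0 : Int)
    calc (PySem.List.enumerate matrix 0).map (fun p => p.2.getD bj.toNat 0)
        = ((PySem.List.enumerate matrix 0).map (fun p => p.2)).map (fun row => row.getD bj.toNat 0) := by
          rw [List.map_map]; rfl
      _ = _ := by rw [h]
  have hcols : matrix.map (fun row => row.getD bj.toNat 0)
      = matrix.map (fun row => PySem.List.pyGetD row b 0) := by
    apply List.map_congr_left
    intro row hr
    exact (hcellrow row hr).symm
  rw [hai', hsnd, hcols, ← hrowA]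
  have hcell : PySem.List.pyGetD (PySem.List.pyGetD matrix a []) b 0
      = (PySem.List.pyGetD matrix a []).getD bj.toNat 0 :=
    hcellrow _ (PySem.List.pyGetD_mem matrix [] ha)
  simp only [List.map_cons, List.map_nil, List.sum_cons, List.sum_nil, add_zero]
  rw [← hcell]
  ring

theorem main_eq (matrix : List (List Int)) (a b : Int) (h : Pre_crossingSum matrix a b) :
    crossingSum matrix a b
      = crossingSum_alt matrix a b
        + (if b < 0 then PySem.List.pyGetD (PySem.List.pyGetD matrix a []) b 0 else 0) := by
  have hbA : PySem.Raise.InRange (PySem.List.pyGetD matrix a []).length b :=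
    h.2.2.1 _ (PySem.List.pyGetD_mem matrix [] h.2.1)
  rw [ports_eval matrix a b h, alt_eval matrix a b h]
  rcases lt_or_ge b 0 with hneg | hpos
  · rw [loop2_neg _ _ _ hneg]
    simp [hneg]
  · have hblt : b < ((PySem.List.pyGetD matrix a []).length : Int) := by
      have := hbA
      simp only [PySem.Raise.InRange] at this
      omega
    rw [loop2_nonneg _ _ _ hpos hblt]
    have : ¬ b < 0 := by omega
    simp [this]

-- ===== VERDICT (by name: the statement is the Claim_ definition above) =====
theorem crossingSum_spec : Claim_unchanged_crossingSum := by
  intro matrix a b _ hpre hnd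
  rw [main_eq matrix a b hpre]
  unfold D_crossingSum at hnd
  by_cases hb : b < 0
  · have : PySem.List.pyGetD (PySem.List.pyGetD matrix a []) b 0 = 0 := by
      by_contra hc
      exact hnd ⟨hb, by rw [cell_eq matrix a b hpre]; exact hc⟩
    simp [hb, this]
  · simp [hb]

theorem crossingSum_changed : Claim_changed_crossingSum := by
  unfold Claim_changed_crossingSum; decide

theorem crossingSum_tight : Claim_exact_crossingSum := by
  intro matrix a b _ hpre hd
  rw [main_eq matrix a b hpre]
  obtain ⟨hb, hc⟩ := hd
  rw [cell_eq matrix a b hpre] at hc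
  simp [hb]
  exact hc
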